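-- pv_equiv track=rewrite | github.com/pavanepour-k/noa | test/evaluation.py | _inference_is_reasonable
-- ===== SOURCE A (Python) =====
-- from typing import List, Dict, Tuple, Optional
--
-- def _inference_is_reasonable(inferred_meanings: List[str], expected_meaning: str) -> bool:
--     """Check if inference is reasonable compared to expected meaning."""
--     if not inferred_meanings:
--         return False
--
--     # Simple keyword matching (could be enhanced)
--     expected_keywords = expected_meaning.lower().split()
--
--     for meaning in inferred_meanings:
--         meaning_keywords = meaning.lower().split()
--         overlap = len(set(expected_keywords) & set(meaning_keywords))
--         if overlap > 0:
--             return True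
--
--     return False
-- ===== SOURCE B (Python) =====
-- from typing import List
--
-- def _inference_is_reasonable(inferred_meanings: List[str], expected_meaning: str) -> bool:
--     """Check if inference is reasonable compared to expected meaning."""
--     expected = set(expected_meaning.lower().split())
--     all_tokens = set()
--     for meaning in inferred_meanings:
--         all_tokens |= set(meaning.lower().split())
--     return bool(expected & all_tokens)
-- ===== Notes on version B (the rewrite author's own statement) =====
-- stated objective: simpler
-- what changed: Instead of A's per-meaning early-return loop that re-intersects the expected keyword set with each meaning's token set, B drops the empty-list guard, accumulates one union set of all meanings' tokens and does a single intersection at the end.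
import Mathlib
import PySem

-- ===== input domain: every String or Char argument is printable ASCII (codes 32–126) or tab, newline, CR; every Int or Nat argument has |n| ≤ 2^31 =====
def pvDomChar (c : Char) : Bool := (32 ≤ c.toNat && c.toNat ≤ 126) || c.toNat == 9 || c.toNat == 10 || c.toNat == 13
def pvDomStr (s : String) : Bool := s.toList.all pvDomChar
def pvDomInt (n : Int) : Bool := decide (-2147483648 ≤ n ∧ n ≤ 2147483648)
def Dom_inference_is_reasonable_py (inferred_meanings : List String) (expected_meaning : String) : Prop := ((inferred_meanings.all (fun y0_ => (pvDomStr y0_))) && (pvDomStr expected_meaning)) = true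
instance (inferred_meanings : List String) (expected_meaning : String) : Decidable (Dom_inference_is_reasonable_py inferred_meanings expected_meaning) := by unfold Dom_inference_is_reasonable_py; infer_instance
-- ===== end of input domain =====

-- B replaces A's per-meaning intersect-and-early-return loop with one accumulated union
-- of all meanings' token sets followed by a single intersection (objective: simpler).

-- ===== PORT A =====
-- tokens of s = s.lower().split()  (used verbatim by both Pythons)
def pvTokens (s : String) : List String := PySem.Str.split₀ (PySem.Str.lower s)

-- A's 'for meaning in inferred_meanings: … if overlap > 0: return True' loop
def pvALoop (expected_keywords : List String) : List String → Bool
  | [] => false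
  | meaning :: rest =>
    let meaning_keywords := pvTokens meaning
    let overlap : Int := PySem.Set.len (PySem.Set.inter (PySem.Set.ofList expected_keywords) (PySem.Set.ofList meaning_keywords))
    if overlap > 0 then true else pvALoop expected_keywords rest

def inference_is_reasonable_py (inferred_meanings : List String) (expected_meaning : String) : Bool :=
  if inferred_meanings = [] then false
  else
    let expected_keywords := pvTokens expected_meaning
    pvALoop expected_keywords inferred_meanings

-- ===== PORT B =====
def inference_is_reasonable_py_alt (inferred_meanings : List String) (expected_meaning : String) : Bool :=
  let expected : PySem.Set String := PySem.Set.ofList (pvTokens expected_meaning)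
  let all_tokens : PySem.Set String :=
    inferred_meanings.foldl (fun acc meaning => PySem.Set.union acc (PySem.Set.ofList (pvTokens meaning))) PySem.Set.empty
  !(PySem.Set.inter expected all_tokens).isEmpty

-- ===== PRECONDITION & SPEC =====
def Spec_inference_is_reasonable_py (inferred_meanings : List String) (expected_meaning : String) (out : Bool) : Prop := out = inference_is_reasonable_py_alt inferred_meanings expected_meaning
instance (inferred_meanings : List String) (expected_meaning : String) (out : Bool) : Decidable (Spec_inference_is_reasonable_py inferred_meanings expected_meaning out) := by unfold Spec_inference_is_reasonable_py; infer_instance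

-- ===== CLAIM (what is proved, stated in full; the proofs are below) =====
def Claim_equal_inference_is_reasonable_py : Prop := ∀ (inferred_meanings : List String) (expected_meaning : String), Dom_inference_is_reasonable_py inferred_meanings expected_meaning → Spec_inference_is_reasonable_py inferred_meanings expected_meaning (inference_is_reasonable_py inferred_meanings expected_meaning)

-- ===== LEMMAS AND PROOFS =====

-- one step of A's loop test: overlap > 0 ↔ some shared token
theorem pv_overlap_pos_iff (E M : List String) :
    (0 < PySem.Set.len (PySem.Set.inter (PySem.Set.ofList E) (PySem.Set.ofList M))) ↔ ∃ t, t ∈ E ∧ t ∈ M := by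
  rw [PySem.Set.len]
  constructor
  · intro h
    have hpos : 0 < (PySem.Set.inter (PySem.Set.ofList E) (PySem.Set.ofList M)).length := by exact_mod_cast h
    obtain ⟨t, ht⟩ := List.exists_mem_of_length_pos hpos
    have := (PySem.Set.mem_inter (PySem.Set.ofList E) (PySem.Set.ofList M) t).mp ht
    exact ⟨t, (PySem.Set.mem_ofList E t).mp this.1, (PySem.Set.mem_ofList M t).mp this.2⟩
  · rintro ⟨t, htE, htM⟩
    have ht : t ∈ PySem.Set.inter (PySem.Set.ofList E) (PySem.Set.ofList M) :=
      (PySem.Set.mem_inter _ _ t).mpr ⟨(PySem.Set.mem_ofList E t).mpr htE, (PySem.Set.mem_ofList M t).mpr htM⟩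
    have : 0 < (PySem.Set.inter (PySem.Set.ofList E) (PySem.Set.ofList M)).length :=
      List.length_pos_of_mem ht
    exact_mod_cast this

theorem pvALoop_iff (E : List String) (ms : List String) :
    pvALoop E ms = true ↔ ∃ m ∈ ms, ∃ t, t ∈ E ∧ t ∈ pvTokens m := by
  induction ms with
  | nil => simp [pvALoop]
  | cons m rest ih =>
    simp only [pvALoop]
    by_cases h : (0 : Int) < PySem.Set.len (PySem.Set.inter (PySem.Set.ofList E) (PySem.Set.ofList (pvTokens m)))
    · rw [if_pos h]
      obtain ⟨t, htE, htM⟩ := (pv_overlap_pos_iff E (pvTokens m)).mp h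
      simp only [List.mem_cons]
      exact iff_of_true trivial ⟨m, Or.inl rfl, t, htE, htM⟩
    · simp only [if_neg h, ih, List.mem_cons]
      constructor
      · rintro ⟨m', hm', ht⟩; exact ⟨m', Or.inr hm', ht⟩
      · rintro ⟨m', hm' | hm', ht⟩
        · exact absurd ((pv_overlap_pos_iff E (pvTokens m')).mpr ht) (hm' ▸ h)
        · exact ⟨m', hm', ht⟩

theorem pv_mem_foldl_union (ms : List String) (acc : PySem.Set String) (t : String) :
    t ∈ ms.foldl (fun acc m => PySem.Set.union acc (PySem.Set.ofList (pvTokens m))) acc ↔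
      t ∈ acc ∨ ∃ m ∈ ms, t ∈ pvTokens m := by
  induction ms generalizing acc with
  | nil => simp
  | cons m rest ih =>
    simp only [List.foldl_cons, ih, PySem.Set.mem_union, PySem.Set.mem_ofList, List.mem_cons]
    constructor
    · rintro ((h | h) | ⟨m', hm', ht⟩)
      · exact Or.inl h
      · exact Or.inr ⟨m, Or.inl rfl, h⟩
      · exact Or.inr ⟨m', Or.inr hm', ht⟩
    · rintro (h | ⟨m', hm' | hm', ht⟩)
      · exact Or.inl (Or.inl h)
      · exact Or.inl (Or.inr (hm' ▸ ht))
      · exact Or.inr ⟨m', hm', ht⟩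

theorem pv_alt_iff (ms : List String) (e : String) :
    inference_is_reasonable_py_alt ms e = true ↔ ∃ m ∈ ms, ∃ t, t ∈ pvTokens e ∧ t ∈ pvTokens m := by
  simp only [inference_is_reasonable_py_alt, Bool.not_eq_true', List.isEmpty_eq_false_iff_exists_mem]
  constructor
  · rintro ⟨t, ht⟩
    obtain ⟨h1, h2⟩ := (PySem.Set.mem_inter _ _ t).mp ht
    have htE := (PySem.Set.mem_ofList _ t).mp h1
    rcases (pv_mem_foldl_union ms PySem.Set.empty t).mp h2 with h | ⟨m, hm, htm⟩
    · simp [PySem.Set.empty] at h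
    · exact ⟨m, hm, t, htE, htm⟩
  · rintro ⟨m, hm, t, htE, htm⟩
    exact ⟨t, (PySem.Set.mem_inter _ _ t).mpr ⟨(PySem.Set.mem_ofList _ t).mpr htE,
      (pv_mem_foldl_union ms _ t).mpr (Or.inr ⟨m, hm, htm⟩)⟩⟩

-- ===== VERDICT (by name: the statement is the Claim_ definition above) =====
theorem inference_is_reasonable_py_spec : Claim_equal_inference_is_reasonable_py := by
  intro ms e _
  unfold Spec_inference_is_reasonable_py
  have hA : inference_is_reasonable_py ms e = true ↔ ∃ m ∈ ms, ∃ t, t ∈ pvTokens e ∧ t ∈ pvTokens m := by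
    by_cases hms : ms = []
    · subst hms; simp [inference_is_reasonable_py]
    · rw [inference_is_reasonable_py, if_neg hms]
      exact pvALoop_iff (pvTokens e) ms
  exact Bool.eq_iff_iff.mpr (hA.trans (pv_alt_iff ms e).symm)
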